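-- pv_equiv track=rewrite | github.com/sungyeong98/study | practice/PCCP_2.py | solution
-- ===== SOURCE A (Python) =====
-- from collections import deque
-- from collections import deque
--
-- dx=[-1,1,0,0]
--
-- dy=[0,0,1,-1]
--
-- def solution(land):
--     max_oil=0
--     #각 열에 대한 오일의 총량을 기록하기 위한 해시
--     oil={i:0 for i in range(len(land[0]))}
--     visited=set()
--     for i in range(len(land)):
--         for j in range(len(land[0])):
--             #방문하지 않은 좌표에 대하여 bfs탐색을 진행하였다.
--             if (i,j) not in visited and land[i][j]==1:
--                 bfs(i,j,land,visited,oil)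
--     for i in oil:
--         max_oil=max(max_oil,oil[i])
--     return max_oil
--
-- def bfs(x,y,land,visited,oil):
--     q=deque()
--     q.append([x,y])
--     #start_num을 이용하여 탐색하기 전 방문했던 좌표의 갯수를 미리 저장하였다.
--     #그리고 new_col을 이용하여 각 탐색에서 방문했던 열 좌표를 기록하였다.
--     new_col,start_num=set(),len(visited)
--     while q:
--         cx,cy=q.popleft()
--         if (cx,cy) not in visited:
--             visited.add((cx,cy))
--             new_col.add(cy)
--             for i in range(4):
--                 nx,ny=cx+dx[i],cy+dy[i]
--                 if 0<=nx<len(land) and 0<=ny<len(land[0]) and land[nx][ny]==1: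
--                     q.append([nx,ny])
--     #oil해시에 오일량을 갱신하는 과정에서 기존에 방문한 열을 제외하기 위한 배열이다.
--     col_chk=[]
--
--     for i in new_col:
--         if i not in col_chk:
--             col_chk.append(i)
--             #탐색을 끝낸 뒤의 visited의 좌표갯수에서 처음 visited의 좌표갯수를 빼면, 오일의 총량을 계산할 수 있다.
--             #이런 방식으로 불필요한 계산을 생략하고 oil해시에 바로 오일의 총량을 바로 업데이트 시켰다.
--             oil[i]+=len(visited)-start_num
-- ===== SOURCE B (Python) =====
-- def solution(land):
--     n, m = len(land), len(land[0])
--     oil = [0] * m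
--     done = set()
--     for i in range(n):
--         for j in range(m):
--             if (i, j) not in done and land[i][j] == 1:
--                 comp = {(i, j)}
--                 while True:
--                     grown = comp | {
--                         (x + dx, y + dy)
--                         for (x, y) in comp
--                         for (dx, dy) in ((-1, 0), (1, 0), (0, 1), (0, -1))
--                         if 0 <= x + dx < n and 0 <= y + dy < m and land[x + dx][y + dy] == 1
--                     }
--                     if len(grown) == len(comp):
--                         break
--                     comp = grown
--                 done |= comp
--                 size = len(comp)
--                 for c in {y for (_, y) in comp}:
--                     oil[c] += size
--     return max(oil, default=0)
-- ===== Notes on version B (the rewrite author's own statement) =====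
-- stated objective: alternative
-- what changed: Connected regions are grown by whole-set dilation to a fixpoint using set algebra instead of a deque-based BFS with per-cell visited bookkeeping, oil totals are kept in a per-column list instead of a pre-seeded dict updated via a visited-count delta, and the answer is taken with max(oil, default=0).
import Mathlib
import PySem

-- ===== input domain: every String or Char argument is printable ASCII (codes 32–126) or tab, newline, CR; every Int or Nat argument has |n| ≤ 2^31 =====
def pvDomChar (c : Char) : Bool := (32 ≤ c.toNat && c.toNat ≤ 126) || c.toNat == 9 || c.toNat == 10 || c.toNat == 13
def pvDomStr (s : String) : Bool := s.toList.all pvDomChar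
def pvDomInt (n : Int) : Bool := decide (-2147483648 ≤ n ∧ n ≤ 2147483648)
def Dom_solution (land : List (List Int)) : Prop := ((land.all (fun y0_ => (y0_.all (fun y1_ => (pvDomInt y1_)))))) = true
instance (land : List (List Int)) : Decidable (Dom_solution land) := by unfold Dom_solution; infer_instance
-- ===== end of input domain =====

-- B replaces the queue-based BFS flood fill with whole-set dilation to a fixpoint (set algebra,
-- no queue and no per-cell visited bookkeeping inside the search) and keeps the per-column oil
-- totals in a list instead of a pre-seeded dict; alternative decomposition, no speed claim.

-- Shared helper: `land[x][y]` after the Python code has checked the bounds itself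
-- (exact there: both indices are then nonnegative and inside the row that is read).
def pvCell (land : List (List Int)) (x y : Int) : Int :=
  PySem.List.pyGetD (PySem.List.pyGetD land x []) y 0

-- Shared helper: the bounds-and-value test `0<=x<len(land) and 0<=y<len(land[0]) and land[x][y]==1`
-- that appears verbatim in both Pythons.
def pvIsLand (land : List (List Int)) (x y : Int) : Bool :=
  decide (0 ≤ x) && decide (x < PySem.List.len land) &&
  decide (0 ≤ y) && decide (y < PySem.List.len (PySem.List.pyGetD land 0 [])) &&
  (pvCell land x y == 1)

-- ===== PORT A =====
def pvDx : List Int := [-1, 1, 0, 0]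
def pvDy : List Int := [0, 0, 1, -1]

-- the `while q:` loop of bfs; hand-ported with a fuel parameter, exact whenever the fuel
-- exceeds 5*(number of cells)+1 (the caller passes that; sufficiency is proved below).
def pvBfsLoop (land : List (List Int)) (fuel : Nat) (q : List (Int × Int))
    (visited : PySem.Set (Int × Int)) (newCol : PySem.Set Int) :
    PySem.Set (Int × Int) × PySem.Set Int :=
  match fuel with
  | 0 => (visited, newCol)
  | fuel + 1 =>
    match q with
    | [] => (visited, newCol)
    | (cx, cy) :: rest =>
      if PySem.Set.contains visited (cx, cy) then
        pvBfsLoop land fuel rest visited newCol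
      else
        let visited' := PySem.Set.add visited (cx, cy)
        let newCol' := PySem.Set.add newCol cy
        let q' := (PySem.List.pyRange 0 4 1).foldl (fun acc i =>
            let nx := cx + PySem.List.pyGetD pvDx i 0
            let ny := cy + PySem.List.pyGetD pvDy i 0
            if pvIsLand land nx ny then acc ++ [(nx, ny)] else acc) rest
        pvBfsLoop land fuel q' visited' newCol'

-- bfs(x, y, land, visited, oil): returns the updated (visited, oil).
-- iterating the set new_col only updates distinct dict keys by +, so Python's hash
-- iteration order cannot affect any oil value.
def pvBfs (x y : Int) (land : List (List Int)) (visited : PySem.Set (Int × Int))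
    (oil : PySem.Dict Int Int) : PySem.Set (Int × Int) × PySem.Dict Int Int :=
  let q : List (Int × Int) := [(x, y)]
  let startNum : Int := PySem.Set.len visited
  let fuel : Nat := 5 * (land.length * (PySem.List.pyGetD land 0 []).length) + 2
  let r := pvBfsLoop land fuel q visited PySem.Set.empty
  let visited' := r.1
  let newCol := r.2
  -- for i in new_col: if i not in col_chk: col_chk.append(i); oil[i] += len(visited)-start_num
  let st := newCol.foldl (fun (st : List Int × PySem.Dict Int Int) i =>
      if i ∈ st.1 then st
      else (st.1 ++ [i], st.2.modify i 0 (· + (PySem.Set.len visited' - startNum)))) ([], oil)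
  (visited', st.2)

def solution (land : List (List Int)) : Int :=
  let maxOil : Int := 0
  let m : Int := PySem.List.len (PySem.List.pyGetD land 0 [])
  let oil : PySem.Dict Int Int :=
    PySem.Dict.ofList ((PySem.List.pyRange 0 m 1).map (fun i => (i, 0)))
  let visited : PySem.Set (Int × Int) := PySem.Set.empty
  let st := (PySem.List.pyRange 0 (PySem.List.len land) 1).foldl
    (fun (st : PySem.Set (Int × Int) × PySem.Dict Int Int) i =>
      (PySem.List.pyRange 0 m 1).foldl
        (fun (st : PySem.Set (Int × Int) × PySem.Dict Int Int) j =>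
          if ¬ (PySem.Set.contains st.1 (i, j) = true) ∧ pvCell land i j = 1 then
            pvBfs i j land st.1 st.2
          else st) st) (visited, oil)
  -- for i in oil: max_oil = max(max_oil, oil[i])
  st.2.keys.foldl (fun mx k => max mx (st.2.getD k 0)) maxOil

-- ===== PORT B =====
-- one dilation of comp: the inner set comprehension of Source B as a list of candidates
def pvGrowList (land : List (List Int)) (comp : PySem.Set (Int × Int)) : List (Int × Int) :=
  comp.flatMap (fun c =>
    ([((-1 : Int), (0 : Int)), (1, 0), (0, 1), (0, -1)]).filterMap (fun d =>
      let nx := c.1 + d.1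
      let ny := c.2 + d.2
      if pvIsLand land nx ny then some (nx, ny) else none))

-- the `while True:` saturation loop; hand-ported with fuel, exact whenever fuel exceeds the
-- number of cells of the grid (each non-final round strictly grows comp; sufficiency proved below).
def pvSat (land : List (List Int)) (fuel : Nat) (comp : PySem.Set (Int × Int)) :
    PySem.Set (Int × Int) :=
  match fuel with
  | 0 => comp
  | fuel + 1 =>
    let grown := PySem.Set.union comp (PySem.Set.ofList (pvGrowList land comp))
    if PySem.Set.len grown = PySem.Set.len comp then comp
    else pvSat land fuel grown

def pvComp (land : List (List Int)) (i j : Int) : PySem.Set (Int × Int) :=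
  pvSat land (land.length * (PySem.List.pyGetD land 0 []).length + 1)
    (PySem.Set.ofList [(i, j)])

def solution_alt (land : List (List Int)) : Int :=
  let m : Int := PySem.List.len (PySem.List.pyGetD land 0 [])
  let oil : List Int := List.replicate m.toNat 0   -- [0] * m
  let done : PySem.Set (Int × Int) := PySem.Set.empty
  let st := (PySem.List.pyRange 0 (PySem.List.len land) 1).foldl
    (fun (st : List Int × PySem.Set (Int × Int)) i =>
      (PySem.List.pyRange 0 m 1).foldl
        (fun (st : List Int × PySem.Set (Int × Int)) j =>
          if ¬ (PySem.Set.contains st.2 (i, j) = true) ∧ pvCell land i j = 1 then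
            let comp := pvComp land i j
            let done' := PySem.Set.union st.2 comp
            let size := PySem.Set.len comp
            let cols : PySem.Set Int := PySem.Set.ofList (comp.map (fun c => c.2))
            let oil' := cols.foldl (fun oil c =>
                PySem.List.pySetD oil c (PySem.List.pyGetD oil c 0 + size)) st.1
            (oil', done')
          else st) st) (oil, done)
  PySem.List.maxD st.1 (fun v => v) 0   -- max(oil, default=0)

-- ===== PRECONDITION & SPEC =====
-- Pre_ excludes exactly the inputs on which the Python A raises IndexError: the empty grid
-- (it reads land[0]) and grids with a row shorter than the first row (indexed land[i][j]).
def Pre_solution (land : List (List Int)) : Prop :=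
  land ≠ [] ∧ ∀ r ∈ land, (PySem.List.pyGetD land 0 []).length ≤ r.length
instance (land : List (List Int)) : Decidable (Pre_solution land) := by
  unfold Pre_solution; infer_instance

def pvWitness_solution : List (List Int) := [[1, 0, 1], [1, 1, 0]]

def Spec_solution (land : List (List Int)) (out : Int) : Prop := out = solution_alt land
instance (land : List (List Int)) (out : Int) : Decidable (Spec_solution land out) := by
  unfold Spec_solution; infer_instance

-- ===== CLAIM (what is proved, stated in full; the proofs are below) =====
def Claim_equal_solution : Prop :=
  ∀ (land : List (List Int)), Dom_solution land → Pre_solution land →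
    Spec_solution land (solution land)

-- ===== LEMMAS AND PROOFS =====

-- ---------- basic graph notions ----------
def pvM (land : List (List Int)) : Int := PySem.List.len (PySem.List.pyGetD land 0 [])

def pvDirs : List (Int × Int) := [(-1, 0), (1, 0), (0, 1), (0, -1)]

def pvGood (land : List (List Int)) (p : Int × Int) : Prop := pvIsLand land p.1 p.2 = true

def pvAdj (land : List (List Int)) (p q : Int × Int) : Prop :=
  pvGood land p ∧ pvGood land q ∧ (q.1 - p.1, q.2 - p.2) ∈ pvDirs

def pvConn (land : List (List Int)) : (Int × Int) → (Int × Int) → Prop :=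
  Relation.ReflTransGen (pvAdj land)

def pvClosed (land : List (List Int)) (S : List (Int × Int)) : Prop :=
  ∀ p ∈ S, ∀ r, pvAdj land p r → r ∈ S

lemma pvIsLand_iff (land : List (List Int)) (x y : Int) :
    pvIsLand land x y = true ↔
      0 ≤ x ∧ x < (land.length : Int) ∧ 0 ≤ y ∧
        y < ((PySem.List.pyGetD land 0 []).length : Int) ∧ pvCell land x y = 1 := by
  simp [pvIsLand, PySem.List.len_eq, and_assoc]

lemma pvAdj_symm {land : List (List Int)} {p q : Int × Int} (h : pvAdj land p q) :
    pvAdj land q p := by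
  obtain ⟨hp, hq, hd⟩ := h
  refine ⟨hq, hp, ?_⟩
  simp only [pvDirs, List.mem_cons, List.not_mem_nil, or_false, Prod.mk.injEq] at hd ⊢
  omega

lemma pvConn_symm {land : List (List Int)} {p q : Int × Int} (h : pvConn land p q) :
    pvConn land q p :=
  Relation.ReflTransGen.symmetric (fun _ _ hxy => pvAdj_symm hxy) h

lemma pvClosed_mem {land : List (List Int)} {S : List (Int × Int)} {p q : Int × Int}
    (hS : pvClosed land S) (hp : p ∈ S) (h : pvConn land p q) : q ∈ S := by
  induction h with
  | refl => exact hp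
  | tail _ step ih => exact hS _ ih _ step

lemma pvAdj_iff_dir {land : List (List Int)} {p : Int × Int} (hp : pvGood land p)
    (q : Int × Int) :
    pvAdj land p q ↔ ∃ d ∈ pvDirs, q = (p.1 + d.1, p.2 + d.2) ∧ pvGood land q := by
  constructor
  · rintro ⟨_, hq, hd⟩
    exact ⟨(q.1 - p.1, q.2 - p.2), hd, by simp, hq⟩
  · rintro ⟨d, hd, rfl, hq⟩
    exact ⟨hp, hq, by simpa using hd⟩

-- a Nodup list of land cells has at most n*m elements
lemma pvLength_le_of_good {land : List (List Int)} {comp : List (Int × Int)}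
    (hn : comp.Nodup) (hg : ∀ p ∈ comp, pvGood land p) :
    comp.length ≤ land.length * (PySem.List.pyGetD land 0 []).length := by
  classical
  rw [← List.toFinset_card_of_nodup hn]
  have := Finset.card_le_card_of_injOn (f := fun p : Int × Int => (p.1.toNat, p.2.toNat))
    (s := comp.toFinset)
    (t := Finset.range land.length ×ˢ Finset.range (PySem.List.pyGetD land 0 []).length)
    (by
      intro p hp
      have h := (pvIsLand_iff land p.1 p.2).1 (hg p (List.mem_toFinset.1 hp))
      simp only [Finset.coe_product, Set.mem_prod, Finset.mem_coe, Finset.mem_range]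
      omega)
    (by
      intro p hp q hq hpq
      have h1 := (pvIsLand_iff land p.1 p.2).1 (hg p (List.mem_toFinset.1 hp))
      have h2 := (pvIsLand_iff land q.1 q.2).1 (hg q (List.mem_toFinset.1 hq))
      simp only [Prod.mk.injEq] at hpq
      have : p.1 = q.1 ∧ p.2 = q.2 := by omega
      exact Prod.ext this.1 this.2)
  simpa using this

-- ---------- B side: the saturation computes the connected component ----------
lemma mem_growList {land : List (List Int)} {comp : PySem.Set (Int × Int)}
    (hg : ∀ c ∈ comp, pvGood land c) (x : Int × Int) :
    x ∈ pvGrowList land comp ↔ ∃ c ∈ comp, pvAdj land c x := by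
  unfold pvGrowList
  rw [List.mem_flatMap]
  constructor
  · rintro ⟨c, hc, hx⟩
    rw [List.mem_filterMap] at hx
    obtain ⟨d, hd, hfd⟩ := hx
    refine ⟨c, hc, ?_⟩
    rw [pvAdj_iff_dir (hg c hc)]
    by_cases h : pvIsLand land (c.1 + d.1) (c.2 + d.2) = true
    · simp only [h, if_pos, Option.some.injEq] at hfd
      subst hfd
      exact ⟨d, by simpa [pvDirs] using hd, rfl, h⟩
    · simp [h] at hfd
  · rintro ⟨c, hc, hadj⟩
    rw [pvAdj_iff_dir (hg c hc)] at hadj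
    obtain ⟨d, hd, rfl, hgx⟩ := hadj
    refine ⟨c, hc, ?_⟩
    rw [List.mem_filterMap]
    exact ⟨d, by simpa [pvDirs] using hd,
      by simp [show pvIsLand land (c.1 + d.1) (c.2 + d.2) = true from hgx]⟩

lemma pvSat_spec {land : List (List Int)} :
    ∀ (fuel : Nat) (comp : PySem.Set (Int × Int)), comp.Nodup →
      (∀ p ∈ comp, pvGood land p) →
      land.length * (PySem.List.pyGetD land 0 []).length < fuel + comp.length →
      (pvSat land fuel comp).Nodup ∧
      (∀ p ∈ comp, p ∈ pvSat land fuel comp) ∧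
      (∀ p ∈ pvSat land fuel comp, pvGood land p) ∧
      pvClosed land (pvSat land fuel comp) ∧
      (∀ x ∈ pvSat land fuel comp, ∃ c ∈ comp, pvConn land c x) := by
  intro fuel
  induction fuel with
  | zero =>
    intro comp hn hg hb
    exact absurd (pvLength_le_of_good hn hg) (by omega)
  | succ fuel ih =>
    intro comp hn hg hb
    rw [show pvSat land (fuel + 1) comp =
        (if PySem.Set.len (PySem.Set.union comp (PySem.Set.ofList (pvGrowList land comp)))
            = PySem.Set.len comp then comp
         else pvSat land fuel (PySem.Set.union comp (PySem.Set.ofList (pvGrowList land comp))))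
      from rfl]
    have hupd : PySem.Set.union comp (PySem.Set.ofList (pvGrowList land comp))
        = comp ++ (PySem.Set.ofList (pvGrowList land comp)).filter
            (fun y => !PySem.Set.contains comp y) := by
      rw [show PySem.Set.union comp (PySem.Set.ofList (pvGrowList land comp))
          = PySem.Set.update comp (PySem.Set.ofList (pvGrowList land comp)) from rfl]
      simpa [PySem.Set.ofList_ofList] using
        PySem.Set.update_eq_append_filter comp (PySem.Set.ofList (pvGrowList land comp))
    by_cases hfix : PySem.Set.len (PySem.Set.union comp (PySem.Set.ofList (pvGrowList land comp)))
        = PySem.Set.len comp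
    · rw [if_pos hfix]
      have hflen : ((PySem.Set.ofList (pvGrowList land comp)).filter
          (fun y => !PySem.Set.contains comp y)).length = 0 := by
        have := congrArg (fun l => l.length) hupd
        simp only [List.length_append] at this
        simp only [PySem.Set.len] at hfix
        omega
      have hsub : ∀ y ∈ pvGrowList land comp, y ∈ comp := by
        intro y hy
        by_contra hyc
        have : y ∈ (PySem.Set.ofList (pvGrowList land comp)).filter
            (fun y => !PySem.Set.contains comp y) := by
          rw [List.mem_filter]
          exact ⟨(PySem.Set.mem_ofList _ _).2 hy, by simpa using hyc⟩
        rw [List.eq_nil_of_length_eq_zero hflen] at this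
        exact absurd this (List.not_mem_nil)
      have hcl : pvClosed land comp := fun p hp r hr =>
        hsub r ((mem_growList hg r).2 ⟨p, hp, hr⟩)
      exact ⟨hn, fun p hp => hp, hg, hcl, fun x hx => ⟨x, hx, Relation.ReflTransGen.refl⟩⟩
    · rw [if_neg hfix]
      have hgn : (PySem.Set.union comp (PySem.Set.ofList (pvGrowList land comp))).Nodup :=
        PySem.Set.nodup_union _ _ hn
      have hmem : ∀ y, y ∈ PySem.Set.union comp (PySem.Set.ofList (pvGrowList land comp))
          ↔ y ∈ comp ∨ y ∈ pvGrowList land comp := by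
        intro y
        rw [PySem.Set.mem_union, PySem.Set.mem_ofList]
      have hgg : ∀ p ∈ PySem.Set.union comp (PySem.Set.ofList (pvGrowList land comp)),
          pvGood land p := by
        intro p hp
        rcases (hmem p).1 hp with h | h
        · exact hg p h
        · exact ((mem_growList hg p).1 h).choose_spec.2.2.1
      have hlen : comp.length + 1
          ≤ (PySem.Set.union comp (PySem.Set.ofList (pvGrowList land comp))).length := by
        have h1 := congrArg (fun l => l.length) hupd
        simp only [List.length_append] at h1
        simp only [PySem.Set.len] at hfix
        have hne : ((PySem.Set.ofList (pvGrowList land comp)).filter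
            (fun y => !PySem.Set.contains comp y)).length ≠ 0 := by
          intro h0
          have heq : (PySem.Set.union comp (PySem.Set.ofList (pvGrowList land comp))).length
              = comp.length := by omega
          exact hfix (by exact_mod_cast heq)
        omega
      obtain ⟨R1, R2, R3, R4, R5⟩ := ih _ hgn hgg (by omega)
      refine ⟨R1, fun p hp => R2 p ((hmem p).2 (Or.inl hp)), R3, R4, fun x hx => ?_⟩
      obtain ⟨c, hcg, hconn⟩ := R5 x hx
      rcases (hmem c).1 hcg with hcc | hcgrow
      · exact ⟨c, hcc, hconn⟩
      · obtain ⟨c0, hc0, hadj⟩ := (mem_growList hg c).1 hcgrow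
        exact ⟨c0, hc0, Relation.ReflTransGen.head hadj hconn⟩

lemma pvComp_spec {land : List (List Int)} {i j : Int} (h : pvGood land (i, j)) :
    (pvComp land i j).Nodup ∧ (∀ p ∈ pvComp land i j, pvGood land p) ∧
      pvClosed land (pvComp land i j) ∧
      (∀ x, x ∈ pvComp land i j ↔ pvConn land (i, j) x) := by
  have h0 : (PySem.Set.ofList [((i : Int), (j : Int))]) = [(i, j)] := rfl
  unfold pvComp
  obtain ⟨R1, R2, R3, R4, R5⟩ := pvSat_spec (land := land)
    (land.length * (PySem.List.pyGetD land 0 []).length + 1) (PySem.Set.ofList [(i, j)])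
    (by rw [h0]; exact List.nodup_singleton _)
    (by rw [h0]; intro p hp; rw [List.mem_singleton] at hp; subst hp; exact h)
    (by rw [h0]; simp only [List.length_singleton]; omega)
  refine ⟨R1, R3, R4, fun x => ⟨?_, ?_⟩⟩
  · intro hx
    obtain ⟨c, hc, hconn⟩ := R5 x hx
    rw [h0, List.mem_singleton] at hc
    subst hc
    exact hconn
  · intro hconn
    exact pvClosed_mem R4 (R2 _ (by rw [h0]; exact List.mem_singleton_self _)) hconn

-- ---------- A side: the BFS loop visits exactly the component ----------
def pvNbrs (land : List (List Int)) (p : Int × Int) : List (Int × Int) :=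
  (pvDirs.map (fun d => (p.1 + d.1, p.2 + d.2))).filter (fun r => pvIsLand land r.1 r.2)

lemma mem_pvNbrs {land : List (List Int)} {p : Int × Int} (hp : pvGood land p)
    (r : Int × Int) : r ∈ pvNbrs land p ↔ pvAdj land p r := by
  unfold pvNbrs
  rw [List.mem_filter, List.mem_map, pvAdj_iff_dir hp]
  constructor
  · rintro ⟨⟨d, hd, rfl⟩, hl⟩
    exact ⟨d, hd, rfl, hl⟩
  · rintro ⟨d, hd, rfl, hl⟩
    exact ⟨⟨d, hd, rfl⟩, hl⟩

lemma length_pvNbrs (land : List (List Int)) (p : Int × Int) :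
    (pvNbrs land p).length ≤ 4 := by
  calc (pvNbrs land p).length ≤ (pvDirs.map (fun d => (p.1 + d.1, p.2 + d.2))).length :=
        List.length_filter_le _ _
    _ = 4 := by simp [pvDirs]

lemma pvBfs_fold_eq (land : List (List Int)) (cx cy : Int) (rest : List (Int × Int)) :
    (PySem.List.pyRange 0 4 1).foldl (fun acc i =>
        let nx := cx + PySem.List.pyGetD pvDx i 0
        let ny := cy + PySem.List.pyGetD pvDy i 0
        if pvIsLand land nx ny then acc ++ [(nx, ny)] else acc) rest
      = rest ++ pvNbrs land (cx, cy) := by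
  have h4 : PySem.List.pyRange 0 4 1 = [0, 1, 2, 3] := by decide
  rw [h4]
  simp only [List.foldl_cons, List.foldl_nil]
  have d0 : PySem.List.pyGetD pvDx 0 0 = -1 := by decide
  have d1 : PySem.List.pyGetD pvDx 1 0 = 1 := by decide
  have d2 : PySem.List.pyGetD pvDx 2 0 = 0 := by decide
  have d3 : PySem.List.pyGetD pvDx 3 0 = 0 := by decide
  have e0 : PySem.List.pyGetD pvDy 0 0 = 0 := by decide
  have e1 : PySem.List.pyGetD pvDy 1 0 = 0 := by decide
  have e2 : PySem.List.pyGetD pvDy 2 0 = 1 := by decide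
  have e3 : PySem.List.pyGetD pvDy 3 0 = -1 := by decide
  rw [d0, d1, d2, d3, e0, e1, e2, e3]
  simp only [pvNbrs, pvDirs, List.map_cons, List.map_nil, List.filter_cons, List.filter_nil]
  split_ifs <;> simp_all

lemma pvBfsLoop_spec {land : List (List Int)} {C V0 : List (Int × Int)} {s : Int × Int}
    (hCc : pvClosed land C) (hCg : ∀ p ∈ C, pvGood land p)
    (hsC : s ∈ C) (hCs : ∀ x ∈ C, pvConn land s x) :
    ∀ (fuel : Nat) (q : List (Int × Int)) (vis : PySem.Set (Int × Int)) (nc : PySem.Set Int),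
      (∀ p ∈ q, p ∈ C) → vis.Nodup →
      (∀ p ∈ vis, p ∈ V0 ∨ p ∈ C) → (∀ p ∈ V0, p ∈ vis) →
      (∀ p ∈ vis, p ∈ C → ∀ r, pvAdj land p r → r ∈ vis ∨ r ∈ q) →
      (s ∈ vis ∨ s ∈ q) →
      (∀ c, c ∈ nc ↔ ∃ p ∈ vis, p ∈ C ∧ p.2 = c) → nc.Nodup →
      5 * (C.toFinset \ vis.toFinset).card + q.length < fuel →
      (pvBfsLoop land fuel q vis nc).1.Nodup ∧
      (∀ p, p ∈ (pvBfsLoop land fuel q vis nc).1 ↔ p ∈ V0 ∨ p ∈ C) ∧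
      (∀ c, c ∈ (pvBfsLoop land fuel q vis nc).2 ↔ ∃ p ∈ C, p.2 = c) ∧
      (pvBfsLoop land fuel q vis nc).2.Nodup := by
  intro fuel
  induction fuel with
  | zero =>
    intro q vis nc _ _ _ _ _ _ _ _ hfuel
    omega
  | succ fuel ih =>
    intro q vis nc hq hvn hsub hV0 hfront hs hnc hncn hfuel
    rcases q with _ | ⟨⟨cx, cy⟩, rest⟩
    · -- queue empty: everything connected to s has been visited
      have hsv : s ∈ vis := by
        rcases hs with h | h
        · exact h
        · exact absurd h (List.not_mem_nil)
      have haux : ∀ x, pvConn land s x → x ∈ vis := by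
        intro x hconn
        induction hconn with
        | refl => exact hsv
        | @tail b c hsb hbc ih2 =>
          have hbC : b ∈ C := pvClosed_mem hCc hsC hsb
          rcases hfront b ih2 hbC c hbc with h | h
          · exact h
          · exact absurd h (List.not_mem_nil)
      refine ⟨hvn, fun p => ⟨hsub p, ?_⟩, fun c => ⟨?_, ?_⟩, hncn⟩
      · rintro (h | h)
        · exact hV0 p h
        · exact haux p (hCs p h)
      · intro hcnc
        obtain ⟨p, _, hpC, hp2⟩ := (hnc c).1 hcnc
        exact ⟨p, hpC, hp2⟩
      · rintro ⟨p, hpC, hp2⟩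
        exact (hnc c).2 ⟨p, haux p (hCs p hpC), hpC, hp2⟩
    · have hunf : pvBfsLoop land (fuel + 1) ((cx, cy) :: rest) vis nc
          = if PySem.Set.contains vis (cx, cy) then pvBfsLoop land fuel rest vis nc
            else pvBfsLoop land fuel
              ((PySem.List.pyRange 0 4 1).foldl (fun acc i =>
                let nx := cx + PySem.List.pyGetD pvDx i 0
                let ny := cy + PySem.List.pyGetD pvDy i 0
                if pvIsLand land nx ny then acc ++ [(nx, ny)] else acc) rest)
              (PySem.Set.add vis (cx, cy)) (PySem.Set.add nc cy) := rfl
      rw [hunf, pvBfs_fold_eq]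
      by_cases hcont : PySem.Set.contains vis (cx, cy) = true
      · rw [if_pos hcont]
        have hmemv : (cx, cy) ∈ vis := (PySem.Set.contains_iff _ _).1 hcont
        refine ih rest vis nc (fun p hp => hq p (List.mem_cons_of_mem _ hp)) hvn hsub hV0
          ?_ ?_ hnc hncn (by simp only [List.length_cons] at hfuel; omega)
        · intro p hp hpC r hr
          rcases hfront p hp hpC r hr with h | h
          · exact Or.inl h
          · rcases List.mem_cons.1 h with h' | h'
            · exact Or.inl (h' ▸ hmemv)
            · exact Or.inr h'
        · rcases hs with h | h
          · exact Or.inl h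
          · rcases List.mem_cons.1 h with h' | h'
            · exact Or.inl (h' ▸ hmemv)
            · exact Or.inr h'
      · rw [if_neg hcont]
        have hnotm : (cx, cy) ∉ vis := fun h => hcont ((PySem.Set.contains_iff _ _).2 h)
        have hpC : (cx, cy) ∈ C := hq _ List.mem_cons_self
        have hgood : pvGood land (cx, cy) := hCg _ hpC
        have hmem_add : ∀ p, p ∈ PySem.Set.add vis (cx, cy) ↔ p ∈ vis ∨ p = (cx, cy) :=
          fun p => PySem.Set.mem_add _ _ _
        refine ih (rest ++ pvNbrs land (cx, cy)) (PySem.Set.add vis (cx, cy))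
          (PySem.Set.add nc cy) ?_ (PySem.Set.nodup_add _ _ hvn) ?_ ?_ ?_ ?_ ?_
          (PySem.Set.nodup_add _ _ hncn) ?_
        · intro p hp
          rcases List.mem_append.1 hp with h | h
          · exact hq p (List.mem_cons_of_mem _ h)
          · exact hCc _ hpC p ((mem_pvNbrs hgood p).1 h)
        · intro p hp
          rcases (hmem_add p).1 hp with h | h
          · exact hsub p h
          · exact Or.inr (h ▸ hpC)
        · exact fun p hp => (hmem_add p).2 (Or.inl (hV0 p hp))
        · intro p hp hpC' r hr
          rcases (hmem_add p).1 hp with h | h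
          · rcases hfront p h hpC' r hr with h' | h'
            · exact Or.inl ((hmem_add r).2 (Or.inl h'))
            · rcases List.mem_cons.1 h' with h'' | h''
              · exact Or.inl ((hmem_add r).2 (Or.inr h''))
              · exact Or.inr (List.mem_append_left _ h'')
          · subst h
            exact Or.inr (List.mem_append_right _ ((mem_pvNbrs hgood r).2 hr))
        · rcases hs with h | h
          · exact Or.inl ((hmem_add s).2 (Or.inl h))
          · rcases List.mem_cons.1 h with h' | h'
            · exact Or.inl ((hmem_add s).2 (Or.inr h'))
            · exact Or.inr (List.mem_append_left _ h')
        · intro c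
          rw [PySem.Set.mem_add]
          constructor
          · rintro (h | hceq)
            · obtain ⟨p, hpv, hpC', hp2⟩ := (hnc c).1 h
              exact ⟨p, (hmem_add p).2 (Or.inl hpv), hpC', hp2⟩
            · exact ⟨(cx, cy), (hmem_add _).2 (Or.inr rfl), hpC, hceq.symm⟩
          · rintro ⟨p, hpv', hpC', hp2⟩
            rcases (hmem_add p).1 hpv' with h | h
            · exact Or.inl ((hnc c).2 ⟨p, h, hpC', hp2⟩)
            · subst h
              exact Or.inr hp2.symm
        · -- fuel bound
          classical
          have hv' : (PySem.Set.add vis (cx, cy)).toFinset = insert (cx, cy) vis.toFinset := by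
            rw [PySem.Set.add_of_not_mem hnotm]
            ext p
            simp [List.mem_toFinset, or_comm]
          have hmemd : (cx, cy) ∈ C.toFinset \ vis.toFinset := by
            rw [Finset.mem_sdiff, List.mem_toFinset, List.mem_toFinset]
            exact ⟨hpC, hnotm⟩
          have hcard : (C.toFinset \ (PySem.Set.add vis (cx, cy)).toFinset).card + 1
              = (C.toFinset \ vis.toFinset).card := by
            rw [hv', Finset.sdiff_insert, Finset.card_erase_of_mem hmemd]
            have : 0 < (C.toFinset \ vis.toFinset).card := Finset.card_pos.2 ⟨_, hmemd⟩
            omega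
          have hlen : (rest ++ pvNbrs land (cx, cy)).length ≤ rest.length + 4 := by
            rw [List.length_append]
            have := length_pvNbrs land (cx, cy)
            omega
          simp only [List.length_cons] at hfuel
          omega

lemma pvLen_of_mem_iff {A C F : List (Int × Int)}
    (hA : A.Nodup) (hC : C.Nodup) (hF : F.Nodup) (hd : ∀ p ∈ C, p ∉ A)
    (hm : ∀ p, p ∈ F ↔ p ∈ A ∨ p ∈ C) : F.length = A.length + C.length := by
  classical
  rw [← List.toFinset_card_of_nodup hA, ← List.toFinset_card_of_nodup hC,
    ← List.toFinset_card_of_nodup hF]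
  have hu : F.toFinset = A.toFinset ∪ C.toFinset := by
    ext p
    simp only [List.mem_toFinset, Finset.mem_union]
    exact hm p
  rw [hu, Finset.card_union_of_disjoint]
  rw [Finset.disjoint_right]
  intro p hp
  simp only [List.mem_toFinset] at *
  exact hd p hp

-- ---------- the two per-column accumulation loops agree ----------
lemma pvFoldA (k : Int) :
    ∀ (l cc : List Int) (d : PySem.Dict Int Int), l.Nodup → (∀ c ∈ l, c ∉ cc) →
      (∀ c : Int,
        (l.foldl (fun (st : List Int × PySem.Dict Int Int) i =>
          if i ∈ st.1 then st
          else (st.1 ++ [i], st.2.modify i 0 (· + k))) (cc, d)).2.getD c 0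
        = d.getD c 0 + (if c ∈ l then k else 0)) ∧
      ((∀ c ∈ l, c ∈ d.keys) →
        (l.foldl (fun (st : List Int × PySem.Dict Int Int) i =>
          if i ∈ st.1 then st
          else (st.1 ++ [i], st.2.modify i 0 (· + k))) (cc, d)).2.keys = d.keys) := by
  intro l
  induction l with
  | nil => intro cc d _ _; simp
  | cons i tl ih =>
    intro cc d hnd hcc
    have hnotcc : i ∉ cc := hcc i List.mem_cons_self
    simp only [List.foldl_cons, if_neg hnotcc]
    obtain ⟨ihl, ihk⟩ := ih (cc ++ [i]) (d.modify i 0 (· + k)) (List.Nodup.of_cons hnd)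
      (fun c' hc' => by
        rw [List.mem_append, List.mem_singleton]
        rintro (h | h)
        · exact hcc c' (List.mem_cons_of_mem _ hc') h
        · exact (List.nodup_cons.1 hnd).1 (h ▸ hc'))
    refine ⟨fun c => ?_, fun hk => ?_⟩
    · rw [ihl c, PySem.Dict.getD_modify]
      by_cases hci : c = i
      · subst hci
        rw [if_pos rfl, if_pos List.mem_cons_self,
          if_neg (fun h => (List.nodup_cons.1 hnd).1 h)]
        ring
      · rw [if_neg hci]
        simp only [List.mem_cons, hci, false_or]
    · have hcont : d.contains i = true :=
        (PySem.Dict.contains_iff_mem_keys _ _).2 (hk i List.mem_cons_self)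
      have hkeys : (d.modify i 0 (· + k)).keys = d.keys := by
        rw [PySem.Dict.keys_modify, PySem.Dict.keys_insert_of_contains _ _ hcont]
      rw [ihk (fun c' hc' => by rw [hkeys]; exact hk c' (List.mem_cons_of_mem _ hc')), hkeys]

lemma pvFoldB (k : Int) :
    ∀ (l : List Int) (xs : List Int), l.Nodup → (∀ c ∈ l, 0 ≤ c ∧ c < (xs.length : Int)) →
      (l.foldl (fun oil c =>
          PySem.List.pySetD oil c (PySem.List.pyGetD oil c 0 + k)) xs).length = xs.length ∧
      ∀ j : Nat, (l.foldl (fun oil c =>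
          PySem.List.pySetD oil c (PySem.List.pyGetD oil c 0 + k)) xs).getD j 0
        = xs.getD j 0 + (if (j : Int) ∈ l then k else 0) := by
  intro l
  induction l with
  | nil => intro xs _ _; simp
  | cons c tl ih =>
    intro xs hnd hb
    obtain ⟨hc0, hclt⟩ := hb c List.mem_cons_self
    have hset : PySem.List.pySetD xs c (PySem.List.pyGetD xs c 0 + k)
        = xs.set c.toNat (PySem.List.pyGetD xs c 0 + k) :=
      PySem.List.pySetD_of_nonneg _ _ hc0
    simp only [List.foldl_cons, hset]
    have hlen : (xs.set c.toNat (PySem.List.pyGetD xs c 0 + k)).length = xs.length :=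
      List.length_set ..
    obtain ⟨ihl, ihg⟩ := ih (xs.set c.toNat (PySem.List.pyGetD xs c 0 + k))
      (List.Nodup.of_cons hnd)
      (fun c' hc' => by rw [hlen]; exact hb c' (List.mem_cons_of_mem _ hc'))
    refine ⟨by rw [ihl, hlen], fun j => ?_⟩
    rw [ihg j]
    have hgd : ∀ (j : Nat), (xs.set c.toNat (PySem.List.pyGetD xs c 0 + k)).getD j 0
        = if j = c.toNat then PySem.List.pyGetD xs c 0 + k else xs.getD j 0 := by
      intro j'
      rw [List.getD_eq_getElem?_getD, List.getD_eq_getElem?_getD, List.getElem?_set]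
      by_cases h : j' = c.toNat
      · rw [if_pos h.symm, if_pos (by omega), if_pos h]
        simp
      · rw [if_neg (fun hh => h hh.symm), if_neg h]
    rw [hgd j]
    have hpg : PySem.List.pyGetD xs c 0 = xs.getD c.toNat 0 := by
      rw [PySem.List.pyGetD_eq_getElem _ _ hc0 (by simpa using hclt),
        List.getD_eq_getElem?_getD, List.getElem?_eq_getElem (by omega)]
      rfl
    by_cases hjc : j = c.toNat
    · have hjx : ((j : Nat) : Int) = c := by omega
      have hnotl : ((j : Nat) : Int) ∉ tl := by
        rw [hjx]; exact (List.nodup_cons.1 hnd).1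
      rw [if_pos hjc, if_neg hnotl,
        if_pos (show ((j : Nat) : Int) ∈ c :: tl by rw [hjx]; exact List.mem_cons_self),
        hpg, hjc]
      ring
    · have hne : ((j : Nat) : Int) ≠ c := by omega
      rw [if_neg hjc]
      by_cases hmt : ((j : Nat) : Int) ∈ tl
      · rw [if_pos hmt, if_pos (List.mem_cons_of_mem _ hmt)]
      · rw [if_neg hmt, if_neg (by simp [List.mem_cons, hne, hmt])]

-- ---------- relating the two outer loops ----------
def pvRel (land : List (List Int)) (stA : PySem.Set (Int × Int) × PySem.Dict Int Int)
    (stB : List Int × PySem.Set (Int × Int)) : Prop :=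
  (∀ p, p ∈ stA.1 ↔ p ∈ stB.2) ∧ stA.1.Nodup ∧ stB.2.Nodup ∧
  (∀ p ∈ stA.1, pvGood land p) ∧ pvClosed land stA.1 ∧
  stA.2.keys = PySem.List.pyRange 0 (pvM land) 1 ∧
  stB.1.length = (pvM land).toNat ∧
  (∀ j : Nat, stA.2.getD (j : Int) 0 = stB.1.getD j 0) ∧
  (∀ x ∈ stB.1, 0 ≤ x)

lemma pvRel_foldl {α : Type} {σ τ : Type} (R : σ → τ → Prop) (l : List α)
    (f : σ → α → σ) (g : τ → α → τ)
    (h : ∀ s t x, x ∈ l → R s t → R (f s x) (g t x)) :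
    ∀ {s0 t0}, R s0 t0 → R (l.foldl f s0) (l.foldl g t0) := by
  induction l with
  | nil => intro s0 t0 h0; exact h0
  | cons x xs ih =>
    intro s0 t0 h0
    exact ih (fun s t y hy => h s t y (List.mem_cons_of_mem _ hy)) (h _ _ _ (List.mem_cons_self) h0)

lemma pvStep {land : List (List Int)} {i j : Int}
    (hi : 0 ≤ i ∧ i < (land.length : Int)) (hj : 0 ≤ j ∧ j < pvM land)
    {stA : PySem.Set (Int × Int) × PySem.Dict Int Int}
    {stB : List Int × PySem.Set (Int × Int)} (hrel : pvRel land stA stB) :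
    pvRel land
      (if ¬ (PySem.Set.contains stA.1 (i, j) = true) ∧ pvCell land i j = 1 then
        pvBfs i j land stA.1 stA.2
      else stA)
      (if ¬ (PySem.Set.contains stB.2 (i, j) = true) ∧ pvCell land i j = 1 then
        let comp := pvComp land i j
        let done' := PySem.Set.union stB.2 comp
        let size := PySem.Set.len comp
        let cols : PySem.Set Int := PySem.Set.ofList (comp.map (fun c => c.2))
        let oil' := cols.foldl (fun oil c =>
            PySem.List.pySetD oil c (PySem.List.pyGetD oil c 0 + size)) stB.1
        (oil', done')
      else stB) := by
  classical
  obtain ⟨hmemAB, hAn, hBn, hAg, hAc, hkeys, hblen, hgetD, hpos⟩ := hrel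
  have hcontiff : (PySem.Set.contains stA.1 (i, j) = true)
      ↔ (PySem.Set.contains stB.2 (i, j) = true) := by
    rw [PySem.Set.contains_iff, PySem.Set.contains_iff]
    exact hmemAB _
  by_cases hgB : ¬ (PySem.Set.contains stB.2 (i, j) = true) ∧ pvCell land i j = 1
  case neg =>
    rw [if_neg hgB, if_neg (fun h => hgB ⟨fun hh => h.1 (hcontiff.2 hh), h.2⟩)]
    exact ⟨hmemAB, hAn, hBn, hAg, hAc, hkeys, hblen, hgetD, hpos⟩
  case pos =>
    rw [if_pos hgB, if_pos ⟨fun hh => hgB.1 (hcontiff.1 hh), hgB.2⟩]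
    have hm' : pvM land = ((PySem.List.pyGetD land 0 []).length : Int) := by
      simp [pvM, PySem.List.len_eq]
    have hgood : pvGood land (i, j) := by
      rw [pvGood, pvIsLand_iff]
      exact ⟨hi.1, hi.2, hj.1, hm' ▸ hj.2, hgB.2⟩
    have hnotin : (i, j) ∉ stA.1 := fun h => hgB.1 ((PySem.Set.contains_iff _ _).2
      ((hmemAB _).1 h))
    obtain ⟨hCn, hCg, hCc, hCiff⟩ := pvComp_spec hgood
    have hsC : (i, j) ∈ pvComp land i j := (hCiff _).2 Relation.ReflTransGen.refl
    have hCs : ∀ x ∈ pvComp land i j, pvConn land (i, j) x := fun x hx => (hCiff x).1 hx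
    have hV0C : ∀ p ∈ stA.1, p ∉ pvComp land i j := by
      intro p hp hpC
      exact hnotin (pvClosed_mem hAc hp (pvConn_symm (hCs p hpC)))
    have hCV0 : ∀ p ∈ pvComp land i j, p ∉ stA.1 := fun p hp h => hV0C p h hp
    -- run the BFS loop lemma
    have hcard : (((pvComp land i j).toFinset \ stA.1.toFinset).card)
        ≤ land.length * (PySem.List.pyGetD land 0 []).length := by
      calc (((pvComp land i j).toFinset \ stA.1.toFinset).card)
          ≤ (pvComp land i j).toFinset.card := Finset.card_le_card (Finset.sdiff_subset)
        _ = (pvComp land i j).length := List.toFinset_card_of_nodup hCn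
        _ ≤ _ := pvLength_le_of_good hCn hCg
    obtain ⟨hRn, hRmem, hRnc, hRncn⟩ := pvBfsLoop_spec (C := pvComp land i j)
      (V0 := stA.1) (s := (i, j)) hCc hCg hsC hCs
      (5 * (land.length * (PySem.List.pyGetD land 0 []).length) + 2)
      [(i, j)] stA.1 PySem.Set.empty
      (fun p hp => by rwa [List.mem_singleton.1 hp])
      hAn (fun p hp => Or.inl hp) (fun p hp => hp)
      (fun p hp hpC _ _ => absurd hpC (hV0C p hp))
      (Or.inr (List.mem_singleton_self _))
      (fun c => by
        constructor
        · intro h; exact absurd h (List.not_mem_nil)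
        · rintro ⟨p, hpv, hpC, _⟩; exact absurd hpC (hV0C p hpv))
      List.nodup_nil
      (by simp only [List.length_singleton]; omega)
    set R := pvBfsLoop land (5 * (land.length * (PySem.List.pyGetD land 0 []).length) + 2)
      [(i, j)] stA.1 PySem.Set.empty with hR
    have hlenR : R.1.length = stA.1.length + (pvComp land i j).length :=
      pvLen_of_mem_iff hAn hCn hRn hCV0 hRmem
    have hkval : PySem.Set.len R.1 - PySem.Set.len stA.1 = ((pvComp land i j).length : Int) := by
      simp only [PySem.Set.len, hlenR]
      push_cast
      ring
    -- the size that B adds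
    have hsize : PySem.Set.len (pvComp land i j) = ((pvComp land i j).length : Int) := rfl
    -- membership in B's column set = membership in A's new_col
    have hcols : ∀ c : Int,
        c ∈ PySem.Set.ofList ((pvComp land i j).map (fun c => c.2)) ↔ c ∈ R.2 := by
      intro c
      rw [PySem.Set.mem_ofList, List.mem_map, hRnc c]
    have hcolgood : ∀ c : Int, c ∈ R.2 → 0 ≤ c ∧ c < pvM land := by
      intro c hc
      obtain ⟨p, hpC, hp2⟩ := (hRnc c).1 hc
      have := (pvIsLand_iff land p.1 p.2).1 (hCg p hpC)
      rw [hm']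
      omega
    -- A's dictionary update
    obtain ⟨hFA, hFAk⟩ := pvFoldA (PySem.Set.len R.1 - PySem.Set.len stA.1) R.2 [] stA.2
      hRncn (fun c _ => List.not_mem_nil)
    have hkeys' : (R.2.foldl (fun (st : List Int × PySem.Dict Int Int) i =>
        if i ∈ st.1 then st
        else (st.1 ++ [i], st.2.modify i 0 (· + (PySem.Set.len R.1 - PySem.Set.len stA.1))))
          ([], stA.2)).2.keys = stA.2.keys := by
      refine hFAk ?_
      intro c hc
      rw [hkeys, PySem.List.mem_pyRange_one]
      exact hcolgood c hc
    -- B's list update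
    obtain ⟨hFBlen, hFBget⟩ := pvFoldB (PySem.Set.len (pvComp land i j))
      (PySem.Set.ofList ((pvComp land i j).map (fun c => c.2))) stB.1
      (PySem.Set.nodup_ofList _)
      (fun c hc => by
        have := hcolgood c ((hcols c).1 hc)
        rw [hblen]
        constructor
        · exact this.1
        · have hm0 : 0 ≤ pvM land := by rw [hm']; positivity
          omega)
    have hknonneg : 0 ≤ PySem.Set.len (pvComp land i j) := by
      rw [hsize]; positivity
    have hksame : PySem.Set.len R.1 - PySem.Set.len stA.1
        = PySem.Set.len (pvComp land i j) := by rw [hkval, hsize]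
    refine ⟨?_, hRn, PySem.Set.nodup_union _ _ hBn, ?_, ?_, ?_, ?_, ?_, ?_⟩
    · intro p
      rw [show (pvBfs i j land stA.1 stA.2).1 = R.1 from rfl, hRmem p,
        PySem.Set.mem_union]
      constructor
      · rintro (h | h)
        · exact Or.inl ((hmemAB p).1 h)
        · exact Or.inr h
      · rintro (h | h)
        · exact Or.inl ((hmemAB p).2 h)
        · exact Or.inr h
    · intro p hp
      rcases (hRmem p).1 hp with h | h
      · exact hAg p h
      · exact hCg p h
    · intro p hp r hr
      rcases (hRmem p).1 hp with h | h
      · exact (hRmem r).2 (Or.inl (hAc p h r hr))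
      · exact (hRmem r).2 (Or.inr (hCc p h r hr))
    · rw [show (pvBfs i j land stA.1 stA.2).2
          = (R.2.foldl (fun (st : List Int × PySem.Dict Int Int) i =>
              if i ∈ st.1 then st
              else (st.1 ++ [i],
                st.2.modify i 0 (· + (PySem.Set.len R.1 - PySem.Set.len stA.1))))
            ([], stA.2)).2 from rfl, hkeys', hkeys]
    · rw [hFBlen, hblen]
    · intro jn
      rw [show (pvBfs i j land stA.1 stA.2).2
          = (R.2.foldl (fun (st : List Int × PySem.Dict Int Int) i =>
              if i ∈ st.1 then st
              else (st.1 ++ [i],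
                st.2.modify i 0 (· + (PySem.Set.len R.1 - PySem.Set.len stA.1))))
            ([], stA.2)).2 from rfl, hFA, hFBget jn, hgetD jn, hksame]
      by_cases hcj : ((jn : Nat) : Int) ∈ R.2
      · rw [if_pos hcj, if_pos ((hcols _).2 hcj)]
      · rw [if_neg hcj, if_neg (fun hh => hcj ((hcols _).1 hh))]
    · intro x hx
      obtain ⟨jn, hjn, hxe⟩ := List.mem_iff_getElem.1 hx
      have hxg : ((PySem.Set.ofList ((pvComp land i j).map (fun c => c.2))).foldl
          (fun oil c => PySem.List.pySetD oil c
            (PySem.List.pyGetD oil c 0 + PySem.Set.len (pvComp land i j))) stB.1).getD jn 0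
          = x := by
        rw [List.getD_eq_getElem?_getD, List.getElem?_eq_getElem hjn, hxe]
        rfl
      rw [hFBget jn] at hxg
      have hold : 0 ≤ stB.1.getD jn 0 := by
        by_cases hjl : jn < stB.1.length
        · refine hpos _ ?_
          rw [List.getD_eq_getElem?_getD, List.getElem?_eq_getElem hjl]
          exact List.getElem_mem hjl
        · rw [List.getD_eq_default _ _ (by omega)]
      rw [← hxg]
      split_ifs
      · omega
      · omega

lemma pvMax?_isSome : ∀ (l : List Int) (a : Int),
    (PySem.List.max? (a :: l) (fun v => v)).isSome = true := by
  intro l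
  induction l with
  | nil => intro a; rfl
  | cons x tl ih =>
    intro a
    have hstep : PySem.List.max? (a :: x :: tl) (fun v => v)
        = PySem.List.max? ((if a < x then x else a) :: tl) (fun v => v) := by
      by_cases h : a < x <;> simp [PySem.List.max?, h]
    rw [hstep]
    exact ih _

lemma pvFoldl_max_le {c : Int} : ∀ (l : List Int) (a : Int), (∀ x ∈ l, x ≤ c) → a ≤ c →
    l.foldl max a ≤ c := by
  intro l
  induction l with
  | nil => intro a _ ha; exact ha
  | cons x tl ih =>
    intro a h ha
    simp only [List.foldl_cons]
    exact ih _ (fun y hy => h y (List.mem_cons_of_mem _ hy))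
      (max_le ha (h x List.mem_cons_self))

lemma pvMaxD_eq (xs : List Int) (hpos : ∀ x ∈ xs, 0 ≤ x) :
    PySem.List.maxD xs (fun v => v) 0 = xs.foldl max 0 := by
  rcases xs with _ | ⟨x0, tl⟩
  · rfl
  · have hsome : (PySem.List.max? (x0 :: tl) (fun v => v)).isSome = true :=
      pvMax?_isSome tl x0
    obtain ⟨m, hm⟩ := Option.isSome_iff_exists.1 hsome
    have hmem := PySem.List.max?_mem hm
    have hmax := PySem.List.max?_isMax hm
    rw [PySem.List.maxD, hm, Option.getD_some]
    have h1 : m ≤ (x0 :: tl).foldl max 0 := (PySem.List.le_foldl_max _ _).2 m hmem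
    have h2 : (x0 :: tl).foldl max 0 ≤ m := by
      refine pvFoldl_max_le _ _ (fun y hy => hmax y hy) ?_
      exact le_trans (hpos x0 List.mem_cons_self) (hmax x0 List.mem_cons_self)
    omega

lemma pvFinal {land : List (List Int)}
    {stA : PySem.Set (Int × Int) × PySem.Dict Int Int}
    {stB : List Int × PySem.Set (Int × Int)} (hrel : pvRel land stA stB) :
    stA.2.keys.foldl (fun mx k => max mx (stA.2.getD k 0)) 0
      = PySem.List.maxD stB.1 (fun v => v) 0 := by
  obtain ⟨_, _, _, _, _, hkeys, hblen, hgetD, hpos⟩ := hrel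
  have hm0 : 0 ≤ pvM land := by simp [pvM, PySem.List.len_eq]
  have hrange : stA.2.keys = (List.range stB.1.length).map (fun k => ((k : Nat) : Int)) := by
    rw [hkeys, PySem.List.pyRange_one, hblen]
    simp
  rw [hrange, List.foldl_map]
  have hfoldeq : (List.range stB.1.length).foldl
      (fun mx jn => max mx (stA.2.getD ((jn : Nat) : Int) 0)) 0
      = (List.range stB.1.length).foldl (fun mx jn => max mx (stB.1.getD jn 0)) 0 := by
    refine PySem.List.foldl_congr_mem _ _ _ _ (fun acc x _ => ?_)
    rw [hgetD x]
  rw [hfoldeq, ← List.foldl_map]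
  have hmapself : (List.range stB.1.length).map (fun jn => stB.1.getD jn 0) = stB.1 := by
    apply List.ext_getElem
    · simp
    · intro idx h1 h2
      simp only [List.getElem_map, List.getElem_range]
      rw [List.getD_eq_getElem?_getD, List.getElem?_eq_getElem h2]
      rfl
  rw [hmapself]
  exact (pvMaxD_eq stB.1 hpos).symm

lemma pvGetD_foldl_insert_zero :
    ∀ (l : List (Int × Int)) (d : PySem.Dict Int Int) (c : Int), (∀ p ∈ l, p.2 = 0) →
      d.getD c 0 = 0 → (l.foldl (fun d p => d.insert p.1 p.2) d).getD c 0 = 0 := by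
  intro l
  induction l with
  | nil => intro d c _ hd; exact hd
  | cons p tl ih =>
    intro d c hval hd
    simp only [List.foldl_cons]
    refine ih _ _ (fun q hq => hval q (List.mem_cons_of_mem _ hq)) ?_
    rw [PySem.Dict.getD_insert]
    split_ifs
    · exact hval p List.mem_cons_self
    · exact hd

-- ===== VERDICT (by name: the statement is the Claim_ definition above) =====
theorem solution_spec : Claim_equal_solution := by
  intro land _ _
  unfold Spec_solution solution solution_alt
  refine pvFinal (land := land) ?_
  refine pvRel_foldl (pvRel land) _ _ _ (fun sA sB i hi hr => ?_) ?_
  · refine pvRel_foldl (pvRel land) _ _ _ (fun sA' sB' j hj hr' => ?_) hr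
    have hi' := (PySem.List.mem_pyRange_one).1 hi
    have hj' := (PySem.List.mem_pyRange_one).1 hj
    exact pvStep (by simpa [PySem.List.len_eq] using hi') hj' hr'
  · rw [show PySem.List.len (PySem.List.pyGetD land 0 []) = pvM land from rfl]
    refine ⟨fun p => Iff.rfl, List.nodup_nil, List.nodup_nil,
      fun p hp => absurd hp (List.not_mem_nil), fun p hp => absurd hp (List.not_mem_nil),
      ?_, by simp [pvM, PySem.List.len_eq], fun jn => ?_, fun x hx => ?_⟩
    · -- keys of {i:0 for i in range(m)} are range(m)
      rw [show PySem.Dict.ofList ((PySem.List.pyRange 0 (pvM land) 1).map (fun i => (i, (0 : Int))))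
          = ((PySem.List.pyRange 0 (pvM land) 1).map (fun i => (i, (0 : Int)))).foldl
              (fun d p => d.insert p.1 p.2) PySem.Dict.empty from rfl,
        PySem.Dict.keys_foldl_insert_key
          (l := (PySem.List.pyRange 0 (pvM land) 1).map (fun i => (i, (0 : Int))))
          (key := fun p : Int × Int => p.1) (f := fun _ p => p.2) (d := PySem.Dict.empty)]
      simp only [PySem.Dict.keys_empty, List.map_map]
      rw [show PySem.Set.update ([] : PySem.Set Int)
            (((PySem.List.pyRange 0 (pvM land) 1)).map ((fun p : Int × Int => p.1) ∘ (fun i => (i, (0 : Int)))))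
          = PySem.Set.ofList (((PySem.List.pyRange 0 (pvM land) 1)).map
              ((fun p : Int × Int => p.1) ∘ (fun i => (i, (0 : Int))))) from
          PySem.Set.update_empty _]
      have : ((PySem.List.pyRange 0 (pvM land) 1)).map
          ((fun p : Int × Int => p.1) ∘ (fun i => (i, (0 : Int)))) = PySem.List.pyRange 0 (pvM land) 1 := by
        simp [Function.comp_def]
      rw [this]
      exact PySem.Set.ofList_eq_self_of_nodup _ (PySem.List.nodup_pyRange_one _ _)
    · -- all oil totals start at 0 on both sides
      rw [show PySem.Dict.ofList ((PySem.List.pyRange 0 (pvM land) 1).map (fun i => (i, (0 : Int))))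
          = ((PySem.List.pyRange 0 (pvM land) 1).map (fun i => (i, (0 : Int)))).foldl
              (fun d p => d.insert p.1 p.2) PySem.Dict.empty from rfl,
        pvGetD_foldl_insert_zero _ _ _ (by
          intro p hp
          obtain ⟨q, _, rfl⟩ := List.mem_map.1 hp
          rfl) (PySem.Dict.getD_empty _ _)]
      rw [List.getD_eq_getElem?_getD, List.getElem?_replicate]
      split_ifs <;> rfl
    · rw [List.eq_of_mem_replicate hx]
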